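-- pv_equiv track=rewrite | github.com/ChristerNilsson/2021 | 007-CodeForces-1000/1447B/1447B.py | f
-- ===== SOURCE A (Python) =====
-- def f(arr):
-- 	arr = [item for sublist in arr for item in sublist]
-- 	neg = 0
-- 	pos = 0
-- 	zero = 0
-- 	summa = 0
-- 	smallest = abs(arr[0])
-- 	for item in arr:
-- 		if item < 0: neg += 1
-- 		elif item == 0: zero += 1
-- 		else: pos += 1
-- 		summa += abs(item)
-- 		if abs(item) < smallest: smallest = abs(item)
-- 	if neg % 2 == 0: return summa
-- 	else:
-- 		return summa if zero > 0 else summa - 2*smallest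
-- ===== SOURCE B (Python) =====
-- def f(arr):
--     flat = [x for row in arr for x in row]
--     # parity DP: even/odd = best total sum using an even/odd number of sign flips so far
--     even, odd = flat[0], -flat[0]
--     for x in flat[1:]:
--         even, odd = max(even + x, odd - x), max(odd + x, even - x)
--     return even
-- ===== Notes on version B (the rewrite author's own statement) =====
-- stated objective: alternative
-- what changed: B replaces A's abs-sum/min-abs/sign-counting computation by a parity dynamic program: it scans the flattened grid once keeping two accumulators (best sum with an even / odd number of sign flips) and returns the even one; A's arithmetic formula never appears.
import Mathlib
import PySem

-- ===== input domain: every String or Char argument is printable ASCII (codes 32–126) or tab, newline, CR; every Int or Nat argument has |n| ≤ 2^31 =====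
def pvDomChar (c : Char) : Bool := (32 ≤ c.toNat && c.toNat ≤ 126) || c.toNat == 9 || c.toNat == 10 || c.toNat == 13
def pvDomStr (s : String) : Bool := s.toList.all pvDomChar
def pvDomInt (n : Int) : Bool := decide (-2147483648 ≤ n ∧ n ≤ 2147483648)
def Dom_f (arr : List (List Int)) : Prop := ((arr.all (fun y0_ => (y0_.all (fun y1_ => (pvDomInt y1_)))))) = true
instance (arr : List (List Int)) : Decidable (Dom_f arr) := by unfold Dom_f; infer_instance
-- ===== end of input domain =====

-- B replaces A's abs-sum/min-abs/sign-count formula by a parity dynamic program (two accumulators: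
-- best sum with an even / odd number of sign flips); same O(n) cost (objective: alternative).
-- An empty flattening (A raises IndexError at arr[0]) is excluded by Pre_.


-- ===== PORT A =====
-- one fold over the flattened list carrying (neg, pos, zero, summa, smallest), as in A's loop
def fStep (st : Int × Int × Int × Int × Int) (item : Int) : Int × Int × Int × Int × Int :=
  let (neg, pos, zero, summa, smallest) := st
  let (neg, pos, zero) :=
    if item < 0 then (neg + 1, pos, zero)
    else if item = 0 then (neg, pos, zero + 1)
    else (neg, pos + 1, zero)
  (neg, pos, zero, summa + |item|, if |item| < smallest then |item| else smallest)

def f (arr : List (List Int)) : Int :=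
  let flat := arr.flatMap (fun sublist => sublist)
  match PySem.List.pyGet? flat 0 with
  | none => 0          -- Python: IndexError at arr[0]; excluded by Pre_f
  | some x0 =>
    let st := flat.foldl fStep (0, 0, 0, 0, |x0|)
    let (neg, _pos, zero, summa, smallest) := st
    if neg % 2 = 0 then summa
    else if zero > 0 then summa else summa - 2 * smallest

-- ===== PORT B =====
-- parity DP: state (even, odd) = best achievable sum with an even / odd number of sign flips
def fAltStep (p : Int × Int) (x : Int) : Int × Int :=
  (max (p.1 + x) (p.2 - x), max (p.2 + x) (p.1 - x))

def f_alt (arr : List (List Int)) : Int :=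
  let flat := arr.flatMap (fun row => row)
  match flat with
  | [] => 0            -- Python: IndexError at flat[0]; excluded by Pre_f
  | x0 :: rest => (rest.foldl fAltStep (x0, -x0)).1

-- ===== PRECONDITION & SPEC =====
-- Pre_f excludes exactly the grids whose flattening is empty: there A raises IndexError at arr[0].
def Pre_f (arr : List (List Int)) : Prop := arr.flatMap (fun sublist => sublist) ≠ []
instance (arr : List (List Int)) : Decidable (Pre_f arr) := by unfold Pre_f; infer_instance
def pvWitness_f : List (List Int) := [[1, -2], [0]]

def Spec_f (arr : List (List Int)) (out : Int) : Prop := out = f_alt arr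
instance (arr : List (List Int)) (out : Int) : Decidable (Spec_f arr out) := by unfold Spec_f; infer_instance

-- ===== CLAIM (what is proved, stated in full; the proofs are below) =====
def Claim_equal_f : Prop := ∀ (arr : List (List Int)), Dom_f arr → Pre_f arr → Spec_f arr (f arr)

-- ===== LEMMAS AND PROOFS =====

-- characterisation of A's fold (the pos component is unused by A's result, hence existential)
theorem fold_spec (l : List Int) (neg pos zero summa smallest : Int) :
    ∃ p, l.foldl fStep (neg, pos, zero, summa, smallest) =
      (neg + ((l.filter (fun x => x < 0)).length : Int),
       p,
       zero + ((l.filter (fun x => x = 0)).length : Int),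
       summa + (l.map (fun x => |x|)).sum,
       (l.map (fun x => |x|)).foldl min smallest) := by
  induction l generalizing neg pos zero summa smallest with
  | nil => exact ⟨pos, by simp⟩
  | cons a l ih =>
    simp only [List.foldl_cons, fStep, List.map_cons, List.filter_cons]
    by_cases ha : a < 0
    · have ha0 : ¬ a = 0 := by omega
      obtain ⟨p, hp⟩ := ih (neg + 1) pos zero (summa + |a|) (if |a| < smallest then |a| else smallest)
      refine ⟨p, ?_⟩
      simp [ha, ha0, hp, Prod.mk.injEq]
      refine ⟨by ring, by ring, ?_⟩
      congr 1
      rw [min_def]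
      split_ifs <;> omega
    · by_cases ha0 : a = 0
      · subst ha0
        obtain ⟨p, hp⟩ := ih neg pos (zero + 1) summa (if (0 : Int) < smallest then 0 else smallest)
        refine ⟨p, ?_⟩
        simp [hp, Prod.mk.injEq]
        refine ⟨by ring, ?_⟩
        congr 1
        rw [min_def]
        split_ifs <;> omega
      · obtain ⟨p, hp⟩ := ih neg (pos + 1) zero (summa + |a|) (if |a| < smallest then |a| else smallest)
        refine ⟨p, ?_⟩
        simp [ha, ha0, hp, Prod.mk.injEq]
        refine ⟨by ring, ?_⟩
        congr 1
        rw [min_def]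
        split_ifs <;> omega

-- invariant of B's parity DP: if the state encodes (S, m, parity b) then after folding l it
-- encodes (S + Σ|l|, min(m, min|l|), b xor parity of negatives in l)
theorem dp_inv (l : List Int) (S m : Int) (b : Bool) (hm : 0 ≤ m) :
    l.foldl fAltStep (S - (if b then 2*m else 0), S - (if b then 0 else 2*m)) =
      (S + (l.map (fun x => |x|)).sum -
         (if (b != (((l.filter (fun x => x < 0)).length % 2) == 1)) then
            2 * ((l.map (fun x => |x|)).foldl min m) else 0),
       S + (l.map (fun x => |x|)).sum -
         (if (b != (((l.filter (fun x => x < 0)).length % 2) == 1)) then 0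
          else 2 * ((l.map (fun x => |x|)).foldl min m))) := by
  induction l generalizing S m b with
  | nil => cases b <;> simp
  | cons a l ih =>
    have hstep : fAltStep (S - (if b then 2*m else 0), S - (if b then 0 else 2*m)) a =
        ((S + |a|) - (if (b != decide (a < 0)) then 2 * (min m |a|) else 0),
         (S + |a|) - (if (b != decide (a < 0)) then 0 else 2 * (min m |a|))) := by
      by_cases ha : a < 0
      · have habs : |a| = -a := abs_of_neg ha
        cases b <;> simp [fAltStep, ha, habs, max_def, min_def] <;> split_ifs <;> omega
      · have habs : |a| = a := abs_of_nonneg (by omega)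
        cases b <;> simp [fAltStep, ha, habs, max_def, min_def] <;> split_ifs <;> omega
    have hm' : 0 ≤ min m |a| := le_min hm (abs_nonneg a)
    have hpar : ((b != decide (a < 0)) != (((l.filter (fun x => decide (x < 0))).length % 2) == 1))
        = (b != ((((a :: l).filter (fun x => decide (x < 0))).length % 2) == 1)) := by
      by_cases ha : a < 0 <;>
        simp only [List.filter_cons, ha, decide_true, decide_false, if_true,
          List.length_cons] <;>
        cases b <;> first
          | rfl
          | (rw [Bool.eq_iff_iff]; simp; omega)
    rw [List.foldl_cons, hstep, ih (S + |a|) (min m |a|) (b != decide (a < 0)) hm', hpar]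
    simp only [List.map_cons, List.sum_cons, List.foldl_cons, Prod.mk.injEq]
    constructor <;> split_ifs <;> ring

theorem foldl_min_le_init (l : List Int) (i : Int) : l.foldl min i ≤ i := by
  induction l generalizing i with
  | nil => simp
  | cons a l ih => exact le_trans (ih _) (min_le_left _ _)

theorem foldl_min_le_mem (l : List Int) (i a : Int) (h : a ∈ l) : l.foldl min i ≤ a := by
  induction l generalizing i with
  | nil => simp at h
  | cons b l ih =>
    rcases List.mem_cons.mp h with rfl | h
    · exact le_trans (foldl_min_le_init l (min i a)) (min_le_right _ _)
    · exact ih _ h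

theorem le_foldl_min (l : List Int) (i c : Int) (hi : c ≤ i) (hl : ∀ a ∈ l, c ≤ a) :
    c ≤ l.foldl min i := by
  induction l generalizing i with
  | nil => simpa
  | cons a l ih =>
    exact ih _ (le_min hi (hl a (List.mem_cons_self))) (fun b hb => hl b (List.mem_cons_of_mem _ hb))

-- min of absolute values is 0 when a zero is present
theorem min_abs_zero (x0 : Int) (rest : List Int) (hz : x0 = 0 ∨ (0 : Int) ∈ rest) :
    (rest.map (fun x => |x|)).foldl min |x0| = 0 := by
  have hM0 : 0 ≤ (rest.map (fun x => |x|)).foldl min |x0| := le_foldl_min _ _ _ (abs_nonneg x0) (by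
    intro a ha
    rcases List.mem_map.mp ha with ⟨b, _, rfl⟩
    exact abs_nonneg b)
  rcases hz with h | h
  · subst h
    have hle := foldl_min_le_init (rest.map (fun x => |x|)) |(0 : Int)|
    simp only [abs_zero] at hle hM0 ⊢
    omega
  · have hle := foldl_min_le_mem (rest.map (fun x => |x|)) |x0| |(0 : Int)|
      (List.mem_map_of_mem (f := fun x => |x|) h)
    simp at hle
    omega

-- ===== VERDICT (by name: the statement is the Claim_ definition above) =====
theorem f_spec : Claim_equal_f := by
  intro arr _ hpre
  obtain ⟨x0, rest, hcons⟩ := List.exists_cons_of_ne_nil hpre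
  unfold Spec_f
  show f arr = f_alt arr
  simp only [f, f_alt, hcons]
  simp only [PySem.List.pyGet?, PySem.List.pyIdx?]
  norm_num
  obtain ⟨p, hp⟩ := fold_spec (x0 :: rest) 0 0 0 0 |x0|
  rw [List.foldl_cons] at hp
  rw [hp]
  simp only [zero_add]
  have hinit : ((x0 : Int), -x0) =
      ((|x0| : Int) - (if decide (x0 < 0) then 2 * |x0| else 0),
       |x0| - (if decide (x0 < 0) then 0 else 2 * |x0|)) := by
    by_cases h : x0 < 0
    · have : |x0| = -x0 := abs_of_neg h
      simp [h, this]
      ring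
    · have : |x0| = x0 := abs_of_nonneg (by omega)
      simp [h, this]
      ring
  rw [hinit, dp_inv rest |x0| |x0| (decide (x0 < 0)) (abs_nonneg x0)]
  simp only [List.map_cons, List.sum_cons, List.foldl_cons, List.filter_cons, min_self]
  have hMle : (rest.map (fun x => |x|)).foldl min |x0| ≤ |x0| := foldl_min_le_init _ _
  have hM0 : 0 ≤ (rest.map (fun x => |x|)).foldl min |x0| := le_foldl_min _ _ _ (abs_nonneg x0) (by
    intro a ha
    rcases List.mem_map.mp ha with ⟨b, _, rfl⟩
    exact abs_nonneg b)
  by_cases hx0 : x0 < 0 <;>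
    by_cases hpar : (rest.filter (fun x => decide (x < 0))).length % 2 = 1
  · have hcond : (decide (x0 < 0) != (((rest.filter (fun x => decide (x < 0))).length % 2) == 1))
        = false := by simp [hx0, hpar]
    rw [hcond]
    simp only [Bool.false_eq_true, if_false, hx0, decide_true, if_true, List.length_cons]
    rw [if_pos (show (2 : Int) ∣ ((((rest.filter (fun x => decide (x < 0))).length + 1 : ℕ)) : Int) by
      omega)]
    ring
  · have hcond : (decide (x0 < 0) != (((rest.filter (fun x => decide (x < 0))).length % 2) == 1))
        = true := by simp [hx0, hpar]
    rw [hcond]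
    simp only [if_true, hx0, decide_true, List.length_cons]
    rw [if_neg (show ¬ (2 : Int) ∣ ((((rest.filter (fun x => decide (x < 0))).length + 1 : ℕ)) : Int) by
      omega)]
    have hx00 : ¬ x0 = 0 := by omega
    simp only [hx00, decide_false, Bool.false_eq_true, if_false]
    by_cases hz : (0 : Int) < (((rest.filter (fun x => decide (x = 0))).length : ℕ) : Int)
    · have hne : rest.filter (fun x => decide (x = 0)) ≠ [] := by
        intro h
        rw [h] at hz
        simp at hz
      obtain ⟨z, hz1⟩ := List.exists_mem_of_ne_nil _ hne
      have hz0 : z = 0 := by simpa using (List.mem_filter.mp hz1).2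
      rw [if_pos hz, min_abs_zero x0 rest (Or.inr (hz0 ▸ (List.mem_filter.mp hz1).1))]
      ring
    · rw [if_neg hz]
  · have hcond : (decide (x0 < 0) != (((rest.filter (fun x => decide (x < 0))).length % 2) == 1))
        = true := by simp [hx0, hpar]
    rw [hcond]
    simp only [if_true, hx0, decide_false, Bool.false_eq_true, if_false]
    rw [if_neg (show ¬ (2 : Int) ∣ ((((rest.filter (fun x => decide (x < 0))).length : ℕ)) : Int) by
      omega)]
    by_cases hz : (0 : Int) <
        (((if decide (x0 = 0) = true then x0 :: rest.filter (fun x => decide (x = 0))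
           else rest.filter (fun x => decide (x = 0))).length : ℕ) : Int)
    · have hzz : x0 = 0 ∨ (0 : Int) ∈ rest := by
        by_cases h0 : x0 = 0
        · exact Or.inl h0
        · simp only [h0, decide_false, Bool.false_eq_true, if_false] at hz
          have hne : rest.filter (fun x => decide (x = 0)) ≠ [] := by
            intro h
            rw [h] at hz
            simp at hz
          obtain ⟨z, hz1⟩ := List.exists_mem_of_ne_nil _ hne
          have hz0 : z = 0 := by simpa using (List.mem_filter.mp hz1).2
          exact Or.inr (hz0 ▸ (List.mem_filter.mp hz1).1)
      rw [if_pos hz, min_abs_zero x0 rest hzz]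
      ring
    · rw [if_neg hz]
  · have hcond : (decide (x0 < 0) != (((rest.filter (fun x => decide (x < 0))).length % 2) == 1))
        = false := by simp [hx0, hpar]
    rw [hcond]
    simp only [Bool.false_eq_true, if_false, hx0, decide_false]
    rw [if_pos (show (2 : Int) ∣ ((((rest.filter (fun x => decide (x < 0))).length : ℕ)) : Int) by
      omega)]
    ring
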